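-- pv_equiv track=rewrite | github.com/rjovelin/miRNA_motifs | polymorphism.py | count_polymorphic_sites_motif
-- ===== SOURCE A (Python) =====
-- def count_polymorphic_sites_motif(alignment, start, stop):
--     '''
--     (dict, str, int, int) -> int
--     Count the number of polymorphic sites in the alignment between positions start and stop
--     Precondition: all sequences are aligned and have the same length
--     '''
--
--     polymorphisms = 0
--     for i in range(start, stop):
--         nucleotides = set()
--         for gene in alignment:
--             nucleotides.add(alignment[gene][i])
--         # exclude gap sites, Ns and sites, ambiguous sites and sites with more than 2 alleles
--         for base in nucleotides:
--             if base not in {'A', 'T', 'C', 'G'}: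
--                 nucleotides = set()
--         if len(nucleotides) == 2:
--             polymorphisms += 1
--
--     return polymorphisms
-- ===== SOURCE B (Python) =====
-- def count_polymorphic_sites_motif(alignment, start, stop):
--     '''
--     (dict, int, int) -> int
--     Count biallelic sites: a column counts iff its characters take exactly two
--     values lo < hi, both valid bases -- decided with min/max comparisons, no sets.
--     '''
--     seqs = [alignment[gene] for gene in alignment]
--     total = 0
--     for i in range(start, stop):
--         chars = [s[i] for s in seqs]
--         if not chars:
--             continue
--         lo = min(chars)
--         hi = max(chars)
--         if lo != hi and lo in 'ATCG' and hi in 'ATCG' \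
--                 and all(c == lo or c == hi for c in chars):
--             total += 1
--     return total
-- ===== Notes on version B (the rewrite author's own statement) =====
-- stated objective: alternative
-- what changed: B drops the set data structure entirely: per column it takes min and max of the characters and counts the column iff min < max, both are valid bases, and every character equals the min or the max - an order-statistics characterisation of 'exactly two distinct valid bases' instead of A's build-a-set-then-reset-then-measure-its-size logic.
import Mathlib
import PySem

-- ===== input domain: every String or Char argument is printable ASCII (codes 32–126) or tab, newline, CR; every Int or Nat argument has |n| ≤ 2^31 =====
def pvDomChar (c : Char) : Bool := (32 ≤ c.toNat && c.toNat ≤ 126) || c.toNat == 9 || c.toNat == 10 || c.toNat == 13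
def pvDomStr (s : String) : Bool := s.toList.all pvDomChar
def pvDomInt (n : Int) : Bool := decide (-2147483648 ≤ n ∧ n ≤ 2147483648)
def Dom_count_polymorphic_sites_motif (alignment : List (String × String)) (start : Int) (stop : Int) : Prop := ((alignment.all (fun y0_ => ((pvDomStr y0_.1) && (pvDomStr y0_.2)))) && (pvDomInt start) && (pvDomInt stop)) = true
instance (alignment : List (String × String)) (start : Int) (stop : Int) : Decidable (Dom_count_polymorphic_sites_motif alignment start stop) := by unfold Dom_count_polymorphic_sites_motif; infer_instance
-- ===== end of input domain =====

-- B decides each column with order statistics (min < max, both valid bases, every char equal to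
-- min or max) instead of A's build-a-nucleotide-set / reset-on-invalid / measure-its-size logic;
-- objective: alternative (no set structure in B).


-- base in {'A','T','C','G'}
def pvIsBase (c : Char) : Bool := c == 'A' || c == 'T' || c == 'C' || c == 'G'

-- ===== PORT A =====
-- Python 'for gene in alignment: alignment[gene][i]' visits exactly the dict's values in
-- insertion order, so the port folds over (Dict.ofList alignment).items and reads p.2[i].
-- PySem.Str.pyGet? = none is exactly where Python raises IndexError (excluded by Pre_).
def count_polymorphic_sites_motif (alignment : List (String × String)) (start : Int) (stop : Int) : Int :=
  let d := PySem.Dict.ofList alignment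
  (PySem.List.pyRange start stop).foldl (fun polymorphisms i =>
    let nucleotides : PySem.Set Char :=
      d.items.foldl (fun nucs p =>
        match PySem.Str.pyGet? p.2 i with
        | some c => PySem.Set.add nucs c
        | none => nucs) PySem.Set.empty
    -- 'for base in nucleotides: if base not in {A,T,C,G}: nucleotides = set()'
    let nucleotides2 :=
      nucleotides.foldl (fun cur base => if pvIsBase base then cur else PySem.Set.empty) nucleotides
    if PySem.Set.len nucleotides2 == 2 then polymorphisms + 1 else polymorphisms) 0

-- ===== PORT B =====
-- No sets: per column, min/max of the characters decide everything.
def count_polymorphic_sites_motif_alt (alignment : List (String × String)) (start : Int) (stop : Int) : Int :=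
  let d := PySem.Dict.ofList alignment
  let seqs := d.items.map (fun p => p.2)          -- [alignment[gene] for gene in alignment]
  (PySem.List.pyRange start stop).foldl (fun total i =>
    let chars := seqs.filterMap (fun s => PySem.Str.pyGet? s i)   -- s[i]; none = IndexError, excluded by Pre_
    if chars.isEmpty then total                                   -- 'if not chars: continue'
    else
      match PySem.List.min? chars (fun c => c), PySem.List.max? chars (fun c => c) with
      | some lo, some hi =>
          if (!(lo == hi)) && pvIsBase lo && pvIsBase hi
              && chars.all (fun c => c == lo || c == hi) then total + 1 else total
      | _, _ => total) 0

-- ===== PRECONDITION & SPEC =====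
-- Pre_ excludes exactly the inputs where Python A raises IndexError: some queried column index
-- start..stop-1 is out of Python's index range -len(seq)..len(seq)-1 for some sequence.
def Pre_count_polymorphic_sites_motif (alignment : List (String × String)) (start : Int) (stop : Int) : Prop :=
  start < stop → ∀ p ∈ alignment, -(((p.2 : String).length : Int)) ≤ start ∧ stop ≤ ((p.2 : String).length : Int)
instance (alignment : List (String × String)) (start : Int) (stop : Int) : Decidable (Pre_count_polymorphic_sites_motif alignment start stop) := by unfold Pre_count_polymorphic_sites_motif; infer_instance

def pvWitness_count_polymorphic_sites_motif : (List (String × String)) × Int × Int :=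
  ([("g1", "ATCG"), ("g2", "AACG"), ("g3", "ATNG")], 0, 4)

def Spec_count_polymorphic_sites_motif (alignment : List (String × String)) (start : Int) (stop : Int) (out : Int) : Prop := out = count_polymorphic_sites_motif_alt alignment start stop
instance (alignment : List (String × String)) (start : Int) (stop : Int) (out : Int) : Decidable (Spec_count_polymorphic_sites_motif alignment start stop out) := by unfold Spec_count_polymorphic_sites_motif; infer_instance

-- ===== CLAIM (what is proved, stated in full; the proofs are below) =====
def Claim_equal_count_polymorphic_sites_motif : Prop := ∀ (alignment : List (String × String)) (start : Int) (stop : Int), Dom_count_polymorphic_sites_motif alignment start stop → Pre_count_polymorphic_sites_motif alignment start stop → Spec_count_polymorphic_sites_motif alignment start stop (count_polymorphic_sites_motif alignment start stop)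

-- ===== LEMMAS AND PROOFS =====

theorem pv_foldl_empty (l : List Char) :
    l.foldl (fun (cur : PySem.Set Char) base => if pvIsBase base then cur else PySem.Set.empty)
      PySem.Set.empty = PySem.Set.empty := by
  induction l with
  | nil => rfl
  | cons b t ih => rw [List.foldl_cons]; split <;> exact ih

-- A's reset loop over the set: empty if any element is invalid, unchanged otherwise
theorem pv_reset (s : PySem.Set Char) (l : List Char) :
    l.foldl (fun cur base => if pvIsBase base then cur else PySem.Set.empty) s
      = if l.all pvIsBase then s else PySem.Set.empty := by
  induction l generalizing s with
  | nil => simp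
  | cons b t ih =>
    rw [List.foldl_cons, List.all_cons]
    cases hb : pvIsBase b
    · rw [if_neg (by simp), if_neg (by simp)]
      exact pv_foldl_empty t
    · rw [if_pos rfl, ih, Bool.true_and]

-- A's set-building loop IS Set.update with the successfully fetched characters
theorem pv_fold_update (items : List (String × String)) (i : Int) (s : PySem.Set Char) :
    items.foldl (fun nucs p =>
        match PySem.Str.pyGet? p.2 i with
        | some c => PySem.Set.add nucs c
        | none => nucs) s
      = PySem.Set.update s (items.filterMap (fun p => PySem.Str.pyGet? p.2 i)) := by
  induction items generalizing s with
  | nil => rw [List.foldl_nil, List.filterMap_nil, PySem.Set.update_nil]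
  | cons p t ih =>
    rw [List.foldl_cons, List.filterMap_cons]
    cases h : PySem.Str.pyGet? p.2 i with
    | none => exact ih s
    | some c => rw [ih, PySem.Set.update_cons]

-- A's "len of the (possibly reset) set == 2" as one boolean
theorem pv_len_reset (s : PySem.Set Char) :
    ((PySem.Set.len (if s.all pvIsBase then s else PySem.Set.empty) == 2) : Bool)
      = (s.all pvIsBase && (PySem.Set.len s == 2)) := by
  cases h : s.all pvIsBase <;> simp [PySem.Set.len, PySem.Set.empty]

-- the core: "exactly two distinct elements, all valid" = the min/max characterisation
theorem pv_col (l : List Char) (lo hi : Char)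
    (hlo : PySem.List.min? l (fun c => c) = some lo)
    (hhi : PySem.List.max? l (fun c => c) = some hi) :
    (((PySem.Set.ofList l).all pvIsBase && (PySem.Set.len (PySem.Set.ofList l) == 2)) : Bool)
      = ((!(lo == hi)) && pvIsBase lo && pvIsBase hi
          && l.all (fun c => c == lo || c == hi)) := by
  have hmemlo : lo ∈ l := PySem.List.min?_mem hlo
  have hmemhi : hi ∈ l := PySem.List.max?_mem hhi
  have hmin : ∀ y ∈ l, lo ≤ y := PySem.List.min?_isMin hlo
  have hmax : ∀ y ∈ l, y ≤ hi := PySem.List.max?_isMax hhi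
  have hnodup : (PySem.Set.ofList l).Nodup := PySem.Set.nodup_ofList l
  rw [Bool.eq_iff_iff]
  simp only [Bool.and_eq_true, List.all_eq_true, Bool.not_eq_true', beq_eq_false_iff_ne,
    Bool.or_eq_true, beq_iff_eq, PySem.Set.len, PySem.Set.mem_ofList, ne_eq]
  constructor
  · rintro ⟨hall, hlen⟩
    have hlen2 : (PySem.Set.ofList l).length = 2 := by exact_mod_cast hlen
    obtain ⟨a, b, hab⟩ := List.length_eq_two.mp hlen2
    have hne : a ≠ b := by
      have h' := hnodup
      rw [hab] at h'
      have := (List.nodup_cons.mp h').1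
      simpa using this
    have hmema : a ∈ l := by
      have : a ∈ PySem.Set.ofList l := by rw [hab]; simp
      exact (PySem.Set.mem_ofList _ _).mp this
    have hmemb : b ∈ l := by
      have : b ∈ PySem.Set.ofList l := by rw [hab]; simp
      exact (PySem.Set.mem_ofList _ _).mp this
    have hlohi : lo ≠ hi := by
      intro he
      apply hne
      have ha := le_antisymm (hmax a hmema) (he ▸ hmin a hmema)
      have hb := le_antisymm (hmax b hmemb) (he ▸ hmin b hmemb)
      rw [ha, hb]
    have hlos : lo = a ∨ lo = b := by
      have : lo ∈ PySem.Set.ofList l := (PySem.Set.mem_ofList _ _).mpr hmemlo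
      rw [hab] at this; simpa using this
    have hhis : hi = a ∨ hi = b := by
      have : hi ∈ PySem.Set.ofList l := (PySem.Set.mem_ofList _ _).mpr hmemhi
      rw [hab] at this; simpa using this
    refine ⟨⟨⟨hlohi, hall lo hmemlo⟩, hall hi hmemhi⟩, ?_⟩
    intro c hc
    have hcs : c = a ∨ c = b := by
      have : c ∈ PySem.Set.ofList l := (PySem.Set.mem_ofList _ _).mpr hc
      rw [hab] at this; simpa using this
    rcases hlos with h1 | h1 <;> rcases hhis with h2 | h2
    · exact absurd (h1.trans h2.symm) hlohi
    · rcases hcs with h3 | h3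
      · exact Or.inl (h3.trans h1.symm)
      · exact Or.inr (h3.trans h2.symm)
    · rcases hcs with h3 | h3
      · exact Or.inr (h3.trans h2.symm)
      · exact Or.inl (h3.trans h1.symm)
    · exact absurd (h1.trans h2.symm) hlohi
  · rintro ⟨⟨⟨hlohi, hvlo⟩, hvhi⟩, hall⟩
    constructor
    · intro x hx
      rcases hall x hx with h | h <;> simp [h, hvlo, hvhi]
    · have hperm : (PySem.Set.ofList l).Perm [lo, hi] := by
        apply (List.perm_ext_iff_of_nodup hnodup (by simp [hlohi])).mpr
        intro x
        rw [PySem.Set.mem_ofList]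
        constructor
        · intro hx
          rcases hall x hx with h | h <;> simp [h]
        · intro hx
          rcases List.mem_pair.mp hx with h | h
          · exact h ▸ hmemlo
          · exact h ▸ hmemhi
      have : (PySem.Set.ofList l).length = 2 := by
        rw [hperm.length_eq]; rfl
      simp [this]

theorem count_polymorphic_sites_motif_spec_aux (alignment : List (String × String)) (start stop : Int) :
    count_polymorphic_sites_motif alignment start stop
      = count_polymorphic_sites_motif_alt alignment start stop := by
  unfold count_polymorphic_sites_motif count_polymorphic_sites_motif_alt
  apply PySem.List.foldl_congr_mem
  intro acc i _
  simp only [pv_fold_update, PySem.Set.update_empty, List.filterMap_map, Function.comp,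
    pv_reset, pv_len_reset]
  set l := (PySem.Dict.ofList alignment).items.filterMap (fun p => PySem.Str.pyGet? p.2 i) with hl
  cases hle : l.isEmpty
  · cases hlo : PySem.List.min? l (fun c => c) with
    | none => exact absurd ((PySem.List.min?_eq_none_iff l _).mp hlo) (by simpa using hle)
    | some lo =>
      cases hhi : PySem.List.max? l (fun c => c) with
      | none => exact absurd ((PySem.List.max?_eq_none_iff l _).mp hhi) (by simpa using hle)
      | some hi =>
        rw [pv_col l lo hi hlo hhi]
        simp
  · have he : l = [] := by simpa using hle
    simp [he, PySem.Set.ofList_nil, PySem.Set.len]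

-- ===== VERDICT (by name: the statement is the Claim_ definition above) =====
theorem count_polymorphic_sites_motif_spec : Claim_equal_count_polymorphic_sites_motif := by
  intro alignment start stop _ _
  exact count_polymorphic_sites_motif_spec_aux alignment start stop
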